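-- pv_equiv track=rewrite | github.com/RonakAgrawal04/Ambiguity-Checker | Main.py | remove_left_recursion
-- ===== SOURCE A (Python) =====
-- def remove_left_recursion(productions):
--     non_recursive = {}
--     recursive = {}
--
--     for non_terminal, rules in productions.items():
--         non_recursive[non_terminal] = []
--         recursive[non_terminal] = []
--         for rule in rules:
--             if rule[0] == non_terminal:
--                 recursive[non_terminal].append(rule[1:])
--             else:
--                 non_recursive[non_terminal].append(rule)
--
--     new_productions = {}
--
--     for non_terminal in productions.keys():
--         if recursive[non_terminal]:
--             new_non_terminal = non_terminal + "'"
--             new_productions[non_terminal] = [rule + new_non_terminal for rule in non_recursive[non_terminal]]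
--             new_productions[new_non_terminal] = [rule + new_non_terminal for rule in recursive[non_terminal]] + ['ε']
--         else:
--             new_productions[non_terminal] = non_recursive[non_terminal]
--
--     return new_productions
-- ===== SOURCE B (Python) =====
-- def remove_left_recursion(productions):
--     out = {}
--     for nt, rules in productions.items():
--         if any(r[0] == nt for r in rules):
--             prime = nt + "'"
--             out[nt] = []
--             out[prime] = []
--             for r in rules:
--                 if r[0] == nt:
--                     out[prime].append(r[1:] + prime)
--                 else:
--                     out[nt].append(r + prime)
--             out[prime].append('ε')
--         else:
--             out[nt] = [r for r in rules]
--     return out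
-- ===== Notes on version B (the rewrite author's own statement) =====
-- stated objective: alternative
-- what changed: Instead of A's two staged passes (first build global non_recursive/recursive partition dicts over all keys, then a second loop over the keys that maps and concatenates them), B makes one pass that pre-tests recursion with any(), pre-creates the one or two output entries, and streams every rule already suffixed directly into the output dict (appending to out[nt] or out[nt']) with the epsilon rule appended last - no partition structures or second mapping pass exist.
import Mathlib
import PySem

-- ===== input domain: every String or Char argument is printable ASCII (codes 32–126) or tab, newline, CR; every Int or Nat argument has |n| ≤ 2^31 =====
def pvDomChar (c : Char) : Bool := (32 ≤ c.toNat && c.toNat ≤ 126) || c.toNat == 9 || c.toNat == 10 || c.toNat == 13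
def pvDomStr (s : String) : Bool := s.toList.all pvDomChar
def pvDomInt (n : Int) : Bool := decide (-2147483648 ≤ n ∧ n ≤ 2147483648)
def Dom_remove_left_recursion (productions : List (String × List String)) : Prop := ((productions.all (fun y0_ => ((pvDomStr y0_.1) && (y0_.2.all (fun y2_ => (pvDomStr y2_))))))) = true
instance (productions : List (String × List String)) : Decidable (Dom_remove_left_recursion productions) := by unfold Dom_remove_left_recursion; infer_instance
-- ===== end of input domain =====

-- B replaces A's two staged passes (global non_recursive/recursive partition dicts, then a second
-- loop over the keys that maps and concatenates them) by one pass that pre-tests recursion with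
-- any() and streams each rule, already suffixed, directly into the output dict; objective: alternative.

-- the Python expression r[0] == nt on a nonempty r (empty rules are excluded by Pre_, where both
-- Pythons raise IndexError at r[0]; the none branch is unreachable on admitted inputs)
def pvHeadEq (nt r : String) : Bool :=
  match PySem.Str.pyGet? r 0 with
  | some c => String.ofList [c] == nt
  | none => false

-- ===== PORT A =====
-- one iteration of A's inner 'for rule in rules' loop
def pvStepRuleA (nt : String)
    (st : PySem.Dict String (List String) × PySem.Dict String (List String)) (rule : String) :
    PySem.Dict String (List String) × PySem.Dict String (List String) :=
  if pvHeadEq nt rule then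
    (st.1, st.2.modify nt [] (· ++ [PySem.Str.slice rule (some 1) none]))
  else
    (st.1.modify nt [] (· ++ [rule]), st.2)

-- one iteration of A's first loop over productions.items()
def pvStep1 (st : PySem.Dict String (List String) × PySem.Dict String (List String))
    (p : String × List String) :
    PySem.Dict String (List String) × PySem.Dict String (List String) :=
  p.2.foldl (pvStepRuleA p.1) (st.1.insert p.1 [], st.2.insert p.1 [])

def pvPass1 (productions : List (String × List String)) :
    PySem.Dict String (List String) × PySem.Dict String (List String) :=
  productions.foldl pvStep1 (PySem.Dict.empty, PySem.Dict.empty)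

-- one iteration of A's second loop over productions.keys(); non_recursive[nt]/recursive[nt] are
-- ported as getD — exact here, since the first loop inserted every key of productions
def pvStep2 (st : PySem.Dict String (List String) × PySem.Dict String (List String))
    (d : PySem.Dict String (List String)) (nt : String) : PySem.Dict String (List String) :=
  if st.2.getD nt [] ≠ [] then
    let nn := nt ++ "'"
    (d.insert nt ((st.1.getD nt []).map (fun rule => rule ++ nn))).insert nn
      (((st.2.getD nt []).map (fun rule => rule ++ nn)) ++ ["ε"])
  else
    d.insert nt (st.1.getD nt [])

def remove_left_recursion (productions : List (String × List String)) :
    List (String × List String) :=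
  let st := pvPass1 productions
  ((productions.map Prod.fst).foldl (pvStep2 st) PySem.Dict.empty).items

-- ===== PORT B =====
-- one iteration of B's inner 'for r in rules' loop: append the already-suffixed rule to out[nt']
-- or out[nt]
def pvStreamRule (nt prime : String) (d : PySem.Dict String (List String)) (r : String) :
    PySem.Dict String (List String) :=
  if pvHeadEq nt r then
    d.modify prime [] (· ++ [PySem.Str.slice r (some 1) none ++ prime])
  else
    d.modify nt [] (· ++ [r ++ prime])

-- one iteration of B's loop over productions.items(): pre-test with any(), pre-create the output
-- entries, stream the rules, append 'ε' last
def pvStepB (d : PySem.Dict String (List String)) (p : String × List String) :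
    PySem.Dict String (List String) :=
  if p.2.any (pvHeadEq p.1) then
    let prime := p.1 ++ "'"
    (p.2.foldl (pvStreamRule p.1 prime) ((d.insert p.1 []).insert prime [])).modify prime []
      (· ++ ["ε"])
  else
    d.insert p.1 (p.2.map (fun r => r))

def remove_left_recursion_alt (productions : List (String × List String)) :
    List (String × List String) :=
  (productions.foldl pvStepB PySem.Dict.empty).items

-- ===== PRECONDITION & SPEC =====
-- Pre_ excludes (a) productions containing an empty rule string, on which both Pythons raise
-- IndexError at r[0], and (b) association lists with duplicate keys, which do not represent any
-- Python dict (both Pythons receive a dict, so such lists have no faithful Python counterpart).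
def Pre_remove_left_recursion (productions : List (String × List String)) : Prop :=
  (productions.map Prod.fst).Nodup ∧ ∀ p ∈ productions, ∀ r ∈ p.2, r ≠ ""
instance (productions : List (String × List String)) :
    Decidable (Pre_remove_left_recursion productions) := by
  unfold Pre_remove_left_recursion; infer_instance

def pvWitness_remove_left_recursion : (List (String × List String)) :=
  [("S", ["Sa", "b"]), ("T", ["b"])]

def Spec_remove_left_recursion (productions : List (String × List String))
    (out : List (String × List String)) : Prop :=
  out = remove_left_recursion_alt productions
instance (productions : List (String × List String)) (out : List (String × List String)) :
    Decidable (Spec_remove_left_recursion productions out) := by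
  unfold Spec_remove_left_recursion; infer_instance

-- ===== CLAIM (what is proved, stated in full; the proofs are below) =====
def Claim_equal_remove_left_recursion : Prop :=
  ∀ (productions : List (String × List String)), Dom_remove_left_recursion productions →
    Pre_remove_left_recursion productions →
    Spec_remove_left_recursion productions (remove_left_recursion productions)

-- ===== LEMMAS AND PROOFS =====

-- the two rule lists both programs compute for one nonterminal (proof vocabulary only)
def pvNonrec (nt : String) (rules : List String) : List String :=
  rules.filter (fun r => !pvHeadEq nt r)
def pvRecT (nt : String) (rules : List String) : List String :=
  (rules.filter (pvHeadEq nt)).map (fun r => PySem.Str.slice r (some 1) none)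

-- the common per-nonterminal output both programs are shown to produce
def pvStepT (d : PySem.Dict String (List String)) (p : String × List String) :
    PySem.Dict String (List String) :=
  if pvRecT p.1 p.2 ≠ [] then
    let nn := p.1 ++ "'"
    (d.insert p.1 ((pvNonrec p.1 p.2).map (fun r => r ++ nn))).insert nn
      (((pvRecT p.1 p.2).map (fun r => r ++ nn)) ++ ["ε"])
  else
    d.insert p.1 (pvNonrec p.1 p.2)

-- ---------- A side: the two-phase construction computes pvNonrec / pvRecT ----------

-- A's inner loop, read off at its own key
lemma pvInner_getD_self (nt : String) (rules : List String) :
    ∀ nr rc : PySem.Dict String (List String),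
      (rules.foldl (pvStepRuleA nt) (nr, rc)).1.getD nt [] = nr.getD nt [] ++ pvNonrec nt rules ∧
      (rules.foldl (pvStepRuleA nt) (nr, rc)).2.getD nt [] = rc.getD nt [] ++ pvRecT nt rules := by
  induction rules with
  | nil => intro nr rc; simp [pvNonrec, pvRecT]
  | cons r rs ih =>
      intro nr rc
      rw [List.foldl_cons]
      by_cases hb : pvHeadEq nt r = true
      · have := ih nr (rc.modify nt [] (· ++ [PySem.Str.slice r (some 1) none]))
        simp [pvStepRuleA, hb, this.1, this.2, PySem.Dict.getD_modify_self,
          pvNonrec, pvRecT]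
      · have := ih (nr.modify nt [] (· ++ [r])) rc
        simp [pvStepRuleA, hb, this.1, this.2, PySem.Dict.getD_modify_self,
          pvNonrec, pvRecT]

-- A's inner loop leaves every other key untouched
lemma pvInner_getD_other (nt : String) (rules : List String) (k : String) (hk : k ≠ nt) :
    ∀ nr rc : PySem.Dict String (List String),
      (rules.foldl (pvStepRuleA nt) (nr, rc)).1.getD k [] = nr.getD k [] ∧
      (rules.foldl (pvStepRuleA nt) (nr, rc)).2.getD k [] = rc.getD k [] := by
  induction rules with
  | nil => intro nr rc; simp
  | cons r rs ih =>
      intro nr rc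
      rw [List.foldl_cons]
      by_cases hb : pvHeadEq nt r = true
      · have hstep : pvStepRuleA nt (nr, rc) r
            = (nr, rc.modify nt [] (· ++ [PySem.Str.slice r (some 1) none])) := by
          simp [pvStepRuleA, hb]
        rw [hstep]
        have := ih nr (rc.modify nt [] (· ++ [PySem.Str.slice r (some 1) none]))
        exact ⟨this.1, this.2.trans (PySem.Dict.getD_modify_of_ne _ _ _ hk)⟩
      · have hstep : pvStepRuleA nt (nr, rc) r = (nr.modify nt [] (· ++ [r]), rc) := by
          simp [pvStepRuleA, hb]
        rw [hstep]
        have := ih (nr.modify nt [] (· ++ [r])) rc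
        exact ⟨this.1.trans (PySem.Dict.getD_modify_of_ne _ _ _ hk), this.2⟩

-- one first-loop entry with a different key leaves key k untouched
lemma pvStep1_getD_other (st : PySem.Dict String (List String) × PySem.Dict String (List String))
    (p : String × List String) (k : String) (hk : k ≠ p.1) :
    (pvStep1 st p).1.getD k [] = st.1.getD k [] ∧
    (pvStep1 st p).2.getD k [] = st.2.getD k [] := by
  unfold pvStep1
  have h := pvInner_getD_other p.1 p.2 k hk (st.1.insert p.1 []) (st.2.insert p.1 [])
  exact ⟨h.1.trans (PySem.Dict.getD_insert_of_ne _ _ _ hk),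
    h.2.trans (PySem.Dict.getD_insert_of_ne _ _ _ hk)⟩

-- the whole first loop over entries with different keys leaves key k untouched
lemma pvFold1_getD_other (l : List (String × List String))
    (k : String) (hk : ∀ p ∈ l, k ≠ p.1) :
    ∀ st : PySem.Dict String (List String) × PySem.Dict String (List String),
      (l.foldl pvStep1 st).1.getD k [] = st.1.getD k [] ∧
      (l.foldl pvStep1 st).2.getD k [] = st.2.getD k [] := by
  induction l with
  | nil => intro st; simp
  | cons p ps ih =>
      intro st
      have h1 := pvStep1_getD_other st p k (hk p (by simp))
      have h2 := ih (fun q hq => hk q (by simp [hq])) (pvStep1 st p)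
      rw [List.foldl_cons]
      exact ⟨h2.1.trans h1.1, h2.2.trans h1.2⟩

-- after A's first loop, each (unique) key holds exactly its own rules' partition
lemma pvPass1_getD (prods : List (String × List String)) (nt : String) (rules : List String)
    (hnd : (prods.map Prod.fst).Nodup) (hmem : (nt, rules) ∈ prods) :
    ∀ st : PySem.Dict String (List String) × PySem.Dict String (List String),
      (prods.foldl pvStep1 st).1.getD nt [] = pvNonrec nt rules ∧
      (prods.foldl pvStep1 st).2.getD nt [] = pvRecT nt rules := by
  induction prods with
  | nil => cases hmem
  | cons p ps ih =>
      intro st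
      rw [List.foldl_cons]
      have hnd' : p.1 ∉ ps.map Prod.fst ∧ (ps.map Prod.fst).Nodup := by
        simpa using hnd
      rcases List.mem_cons.mp hmem with hp | hp
      · subst hp
        have hkeys : ∀ q ∈ ps, nt ≠ q.1 := fun q hq hEq =>
          hnd'.1 (List.mem_map.mpr ⟨q, hq, hEq.symm⟩)
        have hother := pvFold1_getD_other ps nt hkeys (pvStep1 st (nt, rules))
        have hself := pvInner_getD_self nt rules (st.1.insert nt []) (st.2.insert nt [])
        constructor
        · rw [hother.1]
          simpa [pvStep1, PySem.Dict.getD_insert_self] using hself.1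
        · rw [hother.2]
          simpa [pvStep1, PySem.Dict.getD_insert_self] using hself.2
      · exact ih hnd'.2 hp (pvStep1 st p)

-- A's second loop over the keys equals the fold of the common step pvStepT
lemma pvPass2_eq (st : PySem.Dict String (List String) × PySem.Dict String (List String))
    (l : List (String × List String))
    (h : ∀ p ∈ l, st.1.getD p.1 [] = pvNonrec p.1 p.2 ∧ st.2.getD p.1 [] = pvRecT p.1 p.2) :
    ∀ d : PySem.Dict String (List String),
      (l.map Prod.fst).foldl (pvStep2 st) d = l.foldl pvStepT d := by
  induction l with
  | nil => intro d; simp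
  | cons p ps ih =>
      intro d
      have hp := h p (by simp)
      have hstep : pvStep2 st d p.1 = pvStepT d p := by
        simp only [pvStep2, pvStepT, hp.1, hp.2]
      rw [List.map_cons, List.foldl_cons, List.foldl_cons, hstep]
      exact ih (fun q hq => h q (by simp [hq])) (pvStepT d p)

-- ---------- B side: the streaming pass computes the same per-key output ----------

lemma pv_ne_append_prime (nt : String) : nt ≠ nt ++ "'" := by
  intro h
  have := congrArg (fun s => s.toList.length) h
  simp at this

-- characterisation of B's inner streaming loop
lemma pvStream_spec (nt prime : String) (hne : nt ≠ prime) (rules : List String) :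
    ∀ e : PySem.Dict String (List String), e.contains nt = true → e.contains prime = true →
      ((rules.foldl (pvStreamRule nt prime) e).keys = e.keys ∧
       ∀ k, (rules.foldl (pvStreamRule nt prime) e).getD k [] =
         if k = prime then e.getD prime [] ++ (pvRecT nt rules).map (fun r => r ++ prime)
         else if k = nt then e.getD nt [] ++ (pvNonrec nt rules).map (fun r => r ++ prime)
         else e.getD k []) := by
  induction rules with
  | nil =>
      intro e _ _
      refine ⟨rfl, fun k => ?_⟩
      simp only [List.foldl_nil, pvNonrec, pvRecT, List.filter_nil, List.map_nil,
        List.append_nil]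
      split_ifs with h1 h2
      · rw [h1]
      · rw [h2]
      · rfl
  | cons r rs ih =>
      intro e hcn hcp
      rw [List.foldl_cons]
      by_cases hb : pvHeadEq nt r = true
      · have hstep : pvStreamRule nt prime e r
            = e.modify prime [] (· ++ [PySem.Str.slice r (some 1) none ++ prime]) := by
          simp [pvStreamRule, hb]
        rw [hstep]
        set e' := e.modify prime [] (· ++ [PySem.Str.slice r (some 1) none ++ prime]) with he'
        have hcn' : e'.contains nt = true := by
          simp [he', PySem.Dict.contains_modify, hcn]
        have hcp' : e'.contains prime = true := by
          simp [he', PySem.Dict.contains_modify, hcp]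
        obtain ⟨hk, hg⟩ := ih e' hcn' hcp'
        refine ⟨hk.trans ?_, fun k => ?_⟩
        · rw [he', PySem.Dict.keys_modify]
          exact PySem.Dict.keys_insert_of_contains _ _ hcp
        · rw [hg k]
          by_cases h1 : k = prime
          · subst h1
            rw [if_pos rfl, if_pos rfl, he', PySem.Dict.getD_modify_self]
            simp [pvRecT, hb]
          · by_cases h2 : k = nt
            · subst h2
              rw [if_neg h1, if_neg h1, if_pos rfl, if_pos rfl, he',
                PySem.Dict.getD_modify_of_ne _ _ _ hne]
              simp [pvNonrec, hb]
            · rw [if_neg h1, if_neg h1, if_neg h2, if_neg h2, he',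
                PySem.Dict.getD_modify_of_ne _ _ _ h1]
      · have hstep : pvStreamRule nt prime e r = e.modify nt [] (· ++ [r ++ prime]) := by
          simp [pvStreamRule, hb]
        rw [hstep]
        set e' := e.modify nt [] (· ++ [r ++ prime]) with he'
        have hcn' : e'.contains nt = true := by
          simp [he', PySem.Dict.contains_modify, hcn]
        have hcp' : e'.contains prime = true := by
          simp [he', PySem.Dict.contains_modify, hcp]
        obtain ⟨hk, hg⟩ := ih e' hcn' hcp'
        refine ⟨hk.trans ?_, fun k => ?_⟩
        · rw [he', PySem.Dict.keys_modify]
          exact PySem.Dict.keys_insert_of_contains _ _ hcn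
        · rw [hg k]
          by_cases h1 : k = prime
          · subst h1
            rw [if_pos rfl, if_pos rfl, he',
              PySem.Dict.getD_modify_of_ne _ _ _ (Ne.symm hne)]
            simp [pvRecT, hb]
          · by_cases h2 : k = nt
            · subst h2
              rw [if_neg h1, if_neg h1, if_pos rfl, if_pos rfl, he',
                PySem.Dict.getD_modify_self]
              simp [pvNonrec, hb]
            · rw [if_neg h1, if_neg h1, if_neg h2, if_neg h2, he',
                PySem.Dict.getD_modify_of_ne _ _ _ h2]

-- double insert at fixed keys: the key list does not depend on the inserted values
lemma pv_keys_insert_insert (d : PySem.Dict String (List String)) (k k' : String)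
    (v v' w w' : List String) :
    ((d.insert k v).insert k' w).keys = ((d.insert k v').insert k' w').keys := by
  have hc : (d.insert k v).contains k' = (d.insert k v').contains k' := by
    rw [PySem.Dict.contains_insert, PySem.Dict.contains_insert]
  have hk1 : (d.insert k v).keys = (d.insert k v').keys := by
    by_cases h1 : d.contains k = true
    · rw [PySem.Dict.keys_insert_of_contains _ _ h1, PySem.Dict.keys_insert_of_contains _ _ h1]
    · rw [PySem.Dict.keys_insert_of_not_contains _ _ (by simpa using h1),
        PySem.Dict.keys_insert_of_not_contains _ _ (by simpa using h1)]
  by_cases h2 : (d.insert k v).contains k' = true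
  · have h2' : (d.insert k v').contains k' = true := by rw [← hc]; exact h2
    rw [PySem.Dict.keys_insert_of_contains (d.insert k v) w h2,
      PySem.Dict.keys_insert_of_contains (d.insert k v') w' h2', hk1]
  · have h2' : (d.insert k v').contains k' = false := by rw [← hc]; simpa using h2
    rw [PySem.Dict.keys_insert_of_not_contains (d.insert k v) w (by simpa using h2),
      PySem.Dict.keys_insert_of_not_contains (d.insert k v') w' h2', hk1]

-- B's per-entry step equals the common step pvStepT (on a dict with unique keys)
lemma pvStepB_eq_T (d : PySem.Dict String (List String)) (hnd : d.keys.Nodup)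
    (p : String × List String) : pvStepB d p = pvStepT d p := by
  obtain ⟨nt, rules⟩ := p
  have hne : nt ≠ nt ++ "'" := pv_ne_append_prime nt
  by_cases hany : rules.any (pvHeadEq nt) = true
  · -- recursive case
    have hrec : pvRecT nt rules ≠ [] := by
      obtain ⟨r, hr, hbr⟩ := List.any_eq_true.mp hany
      simp only [pvRecT, ne_eq, List.map_eq_nil_iff, List.filter_eq_nil_iff]
      push Not
      exact ⟨r, hr, by simp [hbr]⟩
    set prime := nt ++ "'" with hprime
    set e0 := (d.insert nt []).insert prime ([] : List String) with he0
    have hcn : e0.contains nt = true := by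
      simp [he0, PySem.Dict.contains_insert]
    have hcp : e0.contains prime = true := by
      simp [he0]
    obtain ⟨hk, hg⟩ := pvStream_spec nt prime hne rules e0 hcn hcp
    set F := rules.foldl (pvStreamRule nt prime) e0 with hF
    have hFc : F.contains prime = true := by
      rw [PySem.Dict.contains_iff_mem_keys, hk, ← PySem.Dict.contains_iff_mem_keys]
      exact hcp
    set T := (d.insert nt ((pvNonrec nt rules).map (fun r => r ++ prime))).insert prime
      (((pvRecT nt rules).map (fun r => r ++ prime)) ++ ["ε"]) with hT
    have hkeysT : T.keys = e0.keys := by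
      rw [hT, he0]; exact pv_keys_insert_insert d nt prime _ _ _ _
    have hkeysL : (F.modify prime [] (· ++ ["ε"])).keys = e0.keys := by
      rw [PySem.Dict.keys_modify, PySem.Dict.keys_insert_of_contains _ _ hFc, hk]
    have hndE : e0.keys.Nodup := by
      rw [he0]
      exact PySem.Dict.nodup_keys_insert _ _ _ (PySem.Dict.nodup_keys_insert _ _ _ hnd)
    have hgetE : ∀ k, e0.getD k [] = if k = prime then [] else if k = nt then [] else d.getD k [] := by
      intro k
      rw [he0, PySem.Dict.getD_insert, PySem.Dict.getD_insert]
    have hgetT : ∀ k, T.getD k [] =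
        if k = prime then ((pvRecT nt rules).map (fun r => r ++ prime)) ++ ["ε"]
        else if k = nt then (pvNonrec nt rules).map (fun r => r ++ prime)
        else d.getD k [] := by
      intro k
      rw [hT, PySem.Dict.getD_insert, PySem.Dict.getD_insert]
    have hgetL : ∀ k, (F.modify prime [] (· ++ ["ε"])).getD k [] = T.getD k [] := by
      intro k
      rw [PySem.Dict.getD_modify, hgetT k]
      by_cases h1 : k = prime
      · rw [if_pos h1, if_pos h1, hg prime, if_pos rfl, hgetE prime, if_pos rfl]
        simp
      · rw [if_neg h1, if_neg h1, hg k, if_neg h1]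
        by_cases h2 : k = nt
        · rw [if_pos h2, if_pos h2, hgetE nt, if_neg hne, if_pos rfl]
          simp
        · rw [if_neg h2, if_neg h2, hgetE k, if_neg h1, if_neg h2]
    have : pvStepB d (nt, rules) = F.modify prime [] (· ++ ["ε"]) := by
      simp only [pvStepB, hany, if_pos, hF, he0, hprime]
    rw [this]
    have hTstep : pvStepT d (nt, rules) = T := by
      simp only [pvStepT, hT, hprime, if_pos hrec]
    rw [hTstep]
    apply PySem.Dict.ext
    rw [PySem.Dict.items_eq_map_keys _ (hkeysL ▸ hndE) ([] : List String),
      PySem.Dict.items_eq_map_keys _ (hkeysT ▸ hndE) ([] : List String), hkeysL, hkeysT]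
    exact List.map_congr_left (fun k _ => by rw [hgetL k])
  · -- non-recursive case
    have hall : ∀ r ∈ rules, pvHeadEq nt r = false := by
      intro r hr
      by_contra h
      exact hany (List.any_eq_true.mpr ⟨r, hr, by simpa using h⟩)
    have hrec : pvRecT nt rules = [] := by
      simp only [pvRecT, List.map_eq_nil_iff, List.filter_eq_nil_iff]
      intro r hr
      simp [hall r hr]
    have hnonrec : pvNonrec nt rules = rules :=
      List.filter_eq_self.mpr (fun r hr => by simp [hall r hr])
    simp [pvStepB, pvStepT, hany, hrec, hnonrec]

-- pvStepT preserves unique keys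
lemma pvStepT_nodup (d : PySem.Dict String (List String)) (hnd : d.keys.Nodup)
    (p : String × List String) : (pvStepT d p).keys.Nodup := by
  unfold pvStepT
  split
  · exact PySem.Dict.nodup_keys_insert _ _ _ (PySem.Dict.nodup_keys_insert _ _ _ hnd)
  · exact PySem.Dict.nodup_keys_insert _ _ _ hnd

-- B's whole loop equals the fold of the common step
lemma pvFoldB_eq (l : List (String × List String)) :
    ∀ d : PySem.Dict String (List String), d.keys.Nodup →
      l.foldl pvStepB d = l.foldl pvStepT d := by
  induction l with
  | nil => intro d _; rfl
  | cons p ps ih =>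
      intro d hnd
      rw [List.foldl_cons, List.foldl_cons, pvStepB_eq_T d hnd p]
      exact ih (pvStepT d p) (pvStepT_nodup d hnd p)

-- ===== VERDICT (by name: the statement is the Claim_ definition above) =====
theorem remove_left_recursion_spec : Claim_equal_remove_left_recursion := by
  intro productions _hdom hpre
  unfold Spec_remove_left_recursion remove_left_recursion remove_left_recursion_alt pvPass1
  show (List.foldl
      (pvStep2 (List.foldl pvStep1 (PySem.Dict.empty, PySem.Dict.empty) productions))
      PySem.Dict.empty (List.map Prod.fst productions)).items
    = (List.foldl pvStepB PySem.Dict.empty productions).items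
  rw [pvPass2_eq (productions.foldl pvStep1 (PySem.Dict.empty, PySem.Dict.empty)) productions
      (fun p hp => pvPass1_getD productions p.1 p.2 hpre.1 (by simpa using hp)
        (PySem.Dict.empty, PySem.Dict.empty))
      PySem.Dict.empty,
    ← pvFoldB_eq productions PySem.Dict.empty (by simp [PySem.Dict.keys_empty])]
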